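-- pv_equiv track=rewrite | github.com/jennyd20/advent_of_code | 2023/day18.py | get_corner_coords
-- ===== SOURCE A (Python) =====
-- def get_corner_coords(plan):
--     corners = []
--     x = 0
--     y = 0
--     for instruction in plan:
--         # Because we're tracing the path, keep track of coordinates between each instruction
--         x, y = find_corner(instruction, corners, x, y)
--     corners.sort()
--     return corners
--
-- def find_corner(instruction, corners, x, y):
--     dir, dist, color = instruction
--
--     offset = dist if (dir == "R" or dir == "U") else -dist
--     # Note: input is guaranteed to begin at a corner, not in the middle of a line
--     if dir in ("L", "R"):
--         x += offset
--     else: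
--         y += offset
--
--     corners.append((x, y))
--     return x, y
-- ===== SOURCE B (Python) =====
-- def _delta(instruction):
--     dir, dist, color = instruction
--     offset = dist if (dir == "R" or dir == "U") else -dist
--     return (offset, 0) if dir in ("L", "R") else (0, offset)
--
--
-- def get_corner_coords(plan):
--     # Map instructions to pure displacement vectors, jump to the path's
--     # endpoint via the coordinate totals, then walk the path backwards,
--     # recording each corner; sorting at the end makes the visit order moot.
--     deltas = [_delta(i) for i in plan]
--     x = sum(d[0] for d in deltas)
--     y = sum(d[1] for d in deltas)
--     corners = []
--     for dx, dy in reversed(deltas):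
--         corners.append((x, y))
--         x -= dx
--         y -= dy
--     return sorted(corners)
-- ===== Notes on version B (the rewrite author's own statement) =====
-- stated objective: alternative
-- what changed: Instead of tracing the path forward through a helper that mutates a shared corners list, B maps each instruction to a pure displacement vector, computes the endpoint by summing the deltas, then walks the path backwards subtracting deltas to collect the corners (order is irrelevant because the result is sorted).
import Mathlib
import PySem

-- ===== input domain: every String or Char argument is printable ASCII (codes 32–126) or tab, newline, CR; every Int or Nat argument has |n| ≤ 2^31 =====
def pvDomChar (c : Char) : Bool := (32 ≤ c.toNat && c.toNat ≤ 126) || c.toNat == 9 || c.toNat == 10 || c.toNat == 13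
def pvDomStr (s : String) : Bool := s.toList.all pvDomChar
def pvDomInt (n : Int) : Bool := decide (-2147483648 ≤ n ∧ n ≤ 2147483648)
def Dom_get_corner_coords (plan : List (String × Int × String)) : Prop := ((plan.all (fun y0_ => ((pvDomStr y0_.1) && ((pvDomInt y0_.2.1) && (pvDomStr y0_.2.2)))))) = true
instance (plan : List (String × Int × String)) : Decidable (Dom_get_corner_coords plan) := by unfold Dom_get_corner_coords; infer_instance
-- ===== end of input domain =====

-- B replaces A's forward stateful trace (helper mutating a shared list) by a
-- pure-deltas + endpoint-totals + backwards walk decomposition (alternative, same cost).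

-- ===== PORT A =====
-- Python's in-place corners.append is modelled by threading the list through the state.
def find_corner (instruction : String × Int × String) (corners : List (Int × Int))
    (x y : Int) : List (Int × Int) × Int × Int :=
  let dir := instruction.1
  let dist := instruction.2.1
  let offset := if dir == "R" || dir == "U" then dist else -dist
  let p : Int × Int := if dir == "L" || dir == "R" then (x + offset, y) else (x, y + offset)
  (corners ++ [p], p.1, p.2)

-- corners.sort(): Python's lexicographic tuple order is the Lex order on Int × Int.
def get_corner_coords (plan : List (String × Int × String)) : List (Int × Int) :=
  let st := plan.foldl
    (fun (st : List (Int × Int) × Int × Int) instruction =>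
      find_corner instruction st.1 st.2.1 st.2.2) ([], 0, 0)
  PySem.List.sorted st.1 (fun p => toLex p)

-- ===== PORT B =====
def pvDelta (instruction : String × Int × String) : Int × Int :=
  let dir := instruction.1
  let dist := instruction.2.1
  let offset := if dir == "R" || dir == "U" then dist else -dist
  if dir == "L" || dir == "R" then (offset, 0) else (0, offset)

def get_corner_coords_alt (plan : List (String × Int × String)) : List (Int × Int) :=
  let deltas := plan.map pvDelta
  let x0 := (deltas.map Prod.fst).sum
  let y0 := (deltas.map Prod.snd).sum
  let st := deltas.reverse.foldl
    (fun (st : Int × Int × List (Int × Int)) d =>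
      (st.1 - d.1, st.2.1 - d.2, st.2.2 ++ [(st.1, st.2.1)])) (x0, y0, [])
  PySem.List.sorted st.2.2 (fun p => toLex p)

-- ===== PRECONDITION & SPEC =====
def Spec_get_corner_coords (plan : List (String × Int × String)) (out : List (Int × Int)) : Prop := out = get_corner_coords_alt plan
instance (plan : List (String × Int × String)) (out : List (Int × Int)) : Decidable (Spec_get_corner_coords plan out) := by unfold Spec_get_corner_coords; infer_instance

-- ===== CLAIM (what is proved, stated in full; the proofs are below) =====
def Claim_equal_get_corner_coords : Prop := ∀ (plan : List (String × Int × String)), Dom_get_corner_coords plan → Spec_get_corner_coords plan (get_corner_coords plan)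

-- ===== LEMMAS AND PROOFS =====

-- The forward corner sequence starting at (x, y), as a function of the deltas.
def walkFrom (x y : Int) : List (Int × Int) → List (Int × Int)
  | [] => []
  | d :: ds => (x + d.1, y + d.2) :: walkFrom (x + d.1) (y + d.2) ds

theorem find_corner_eq (i : String × Int × String) (corners : List (Int × Int)) (x y : Int) :
    find_corner i corners x y =
      (corners ++ [(x + (pvDelta i).1, y + (pvDelta i).2)],
       x + (pvDelta i).1, y + (pvDelta i).2) := by
  simp only [find_corner, pvDelta]
  split_ifs <;> simp

theorem foldl_A_eq (plan : List (String × Int × String)) :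
    ∀ (corners : List (Int × Int)) (x y : Int),
      (plan.foldl (fun (st : List (Int × Int) × Int × Int) instruction =>
          find_corner instruction st.1 st.2.1 st.2.2) (corners, x, y)).1
        = corners ++ walkFrom x y (plan.map pvDelta) := by
  induction plan with
  | nil => intro corners x y; simp [walkFrom]
  | cons i rest ih =>
      intro corners x y
      rw [List.map_cons, walkFrom, List.foldl_cons]
      dsimp only
      rw [find_corner_eq, ih]
      simp

theorem foldl_B_eq (ds : List (Int × Int)) :
    ∀ (x y : Int) (acc : List (Int × Int)),
      ds.reverse.foldl
        (fun (st : Int × Int × List (Int × Int)) d =>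
          (st.1 - d.1, st.2.1 - d.2, st.2.2 ++ [(st.1, st.2.1)]))
        (x + (ds.map Prod.fst).sum, y + (ds.map Prod.snd).sum, acc)
        = (x, y, acc ++ (walkFrom x y ds).reverse) := by
  induction ds with
  | nil => intro x y acc; simp [walkFrom]
  | cons d ds ih =>
      intro x y acc
      simp only [List.reverse_cons, List.foldl_append, List.map_cons, List.sum_cons, walkFrom]
      have h1 : x + (d.1 + (ds.map Prod.fst).sum) = (x + d.1) + (ds.map Prod.fst).sum := by ring
      have h2 : y + (d.2 + (ds.map Prod.snd).sum) = (y + d.2) + (ds.map Prod.snd).sum := by ring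
      rw [h1, h2, ih (x + d.1) (y + d.2) acc]
      simp only [List.foldl_cons, List.foldl_nil, Prod.mk.injEq]
      refine ⟨by ring, by ring, by simp⟩

theorem toLex_injective : Function.Injective (fun p : Int × Int => toLex p) :=
  fun _ _ h => toLex.injective h

-- ===== VERDICT (by name: the statement is the Claim_ definition above) =====
theorem get_corner_coords_spec : Claim_equal_get_corner_coords := by
  intro plan _
  unfold Spec_get_corner_coords get_corner_coords get_corner_coords_alt
  have hA := foldl_A_eq plan ([]) 0 0
  have hB := foldl_B_eq (plan.map pvDelta) 0 0 []
  simp only [zero_add] at hB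
  simp only [hA, hB, List.nil_append]
  exact PySem.List.sorted_eq_sorted_of_perm _ _ _ toLex_injective
    (List.reverse_perm _).symm
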